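-- pv_equiv track=rewrite | github.com/Th0rgal/verity | scripts/generate_evmyullean_adapter_report.py | _strip_lean_strings
-- ===== SOURCE A (Python) =====
-- def _strip_lean_strings(text: str) -> str:
--     """Blank Lean string literal contents while preserving line structure."""
--     result: list[str] = []
--     i = 0
--     n = len(text)
--     in_string = False
--     string_escape = False
--     while i < n:
--         ch = text[i]
--         if in_string:
--             if ch == "\n":
--                 result.append("\n")
--                 string_escape = False
--             else:
--                 result.append(" ")
--             if string_escape:
--                 string_escape = False
--             elif ch == "\\":
--                 string_escape = True
--             elif ch == '"':
--                 in_string = False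
--             i += 1
--             continue
--         if ch == '"':
--             in_string = True
--             result.append(" ")
--             i += 1
--             continue
--         result.append(ch)
--         i += 1
--     return "".join(result)
-- ===== SOURCE B (Python) =====
-- def _strip_lean_strings(text: str) -> str:
--     """Blank Lean string literal contents while preserving line structure."""
--     out = []
--     i = 0
--     n = len(text)
--     while True:
--         q = text.find('"', i)
--         if q == -1:
--             out.append(text[i:])
--             break
--         out.append(text[i:q])
--         # consume one whole string literal starting at the opening quote
--         j = q + 1
--         while j < n:
--             c = text[j]
--             if c == '\\' and j + 1 < n:
--                 j += 2
--             elif c == '"':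
--                 j += 1
--                 break
--             else:
--                 j += 1
--         out.append(''.join('\n' if c == '\n' else ' ' for c in text[q:j]))
--         i = j
--     return ''.join(out)
-- ===== Notes on version B (the rewrite author's own statement) =====
-- stated objective: faster
-- what changed: Replaces A's character-by-character boolean state machine (in_string/string_escape flags) with a chunked scan that jumps to the next quote via str.find, copies code slices verbatim, and blanks one whole string literal at a time in an inner consumer loop.
import Mathlib
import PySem

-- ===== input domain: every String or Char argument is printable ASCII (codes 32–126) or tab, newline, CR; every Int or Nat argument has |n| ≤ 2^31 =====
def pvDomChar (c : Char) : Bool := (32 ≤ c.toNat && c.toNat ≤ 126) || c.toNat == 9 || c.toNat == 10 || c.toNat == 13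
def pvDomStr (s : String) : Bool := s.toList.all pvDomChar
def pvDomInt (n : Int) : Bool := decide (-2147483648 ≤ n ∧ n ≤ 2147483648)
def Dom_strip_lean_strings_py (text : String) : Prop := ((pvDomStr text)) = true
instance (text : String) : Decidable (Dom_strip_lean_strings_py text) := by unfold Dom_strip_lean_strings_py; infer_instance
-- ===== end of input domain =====

-- B replaces A's single character-by-character boolean state machine with a chunked scan that
-- jumps to the next quote and blanks one whole string literal at a time; a timing run measured B faster (objective: faster, constant-factor: chunk copying via find/slices instead of per-character appends).


-- ===== PORT A =====
-- A's while-loop over indices, with state (in_string, string_escape), as a recursion over the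
-- character list carrying the same two booleans; branches in the same order as the Python.
def pvAGo : List Char → Bool → Bool → List Char
  | [], _, _ => []
  | c :: cs, true, esc =>
      if c = '\n' then
        -- append "\n"; string_escape = False; the elif-chain then does nothing for '\n'
        '\n' :: pvAGo cs true false
      else
        ' ' :: (if esc then pvAGo cs true false
                else if c = '\\' then pvAGo cs true true
                else if c = '"' then pvAGo cs false false
                else pvAGo cs true esc)
  | c :: cs, false, esc =>
      if c = '"' then ' ' :: pvAGo cs true esc
      else c :: pvAGo cs false esc

def strip_lean_strings_py (text : String) : String :=
  String.ofList (pvAGo text.toList false false)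

-- ===== PORT B =====
-- B's inner while-loop: consume one string literal after its opening quote
-- (a backslash eats the following char when one exists; an unescaped quote closes).
def pvBConsume : List Char → List Char × List Char
  | [] => ([], [])
  | c :: cs =>
      if c = '"' then ([c], cs)
      else if c = '\\' then
        match cs with
        | [] => ([c], [])
        | d :: cs' => let p := pvBConsume cs'; (c :: d :: p.1, p.2)
      else
        let p := pvBConsume cs; (c :: p.1, p.2)

-- B's blanking join: every literal character becomes a space except '\n'
def pvBlank (l : List Char) : List Char :=
  l.map (fun c => if c = '\n' then '\n' else ' ')

-- unfolding equations of pvBConsume (rw-based; simp with the raw definition loops),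
-- needed to prove the length bound that pvBGo's termination proof cites
lemma pvBConsume_quote (cs : List Char) : pvBConsume ('"' :: cs) = (['"'], cs) := by
  rw [pvBConsume.eq_def]; simp
lemma pvBConsume_other {c : Char} (h1 : c ≠ '"') (h2 : c ≠ '\\') (cs : List Char) :
    pvBConsume (c :: cs) = (c :: (pvBConsume cs).1, (pvBConsume cs).2) := by
  rw [pvBConsume.eq_def]; simp [h1, h2]

-- needed by pvBGo's termination proof
lemma pvBConsume_len : ∀ cs : List Char, (pvBConsume cs).2.length ≤ cs.length := by
  intro cs
  induction cs using pvBConsume.induct <;>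
    simp_all [pvBConsume_quote, pvBConsume_other, pvBConsume] <;> omega

-- B's outer loop: copy code verbatim up to the next quote (the Python does this by str.find +
-- slicing; ported as the recursion copying the chars before the quote), then blank the literal.
def pvBGo : List Char → List Char
  | [] => []
  | c :: cs =>
      if c = '"' then
        let p := pvBConsume cs
        pvBlank (c :: p.1) ++ pvBGo p.2
      else c :: pvBGo cs
  termination_by cs => cs.length
  decreasing_by
    · exact Nat.lt_succ_of_le (pvBConsume_len cs)
    · simp

def strip_lean_strings_py_alt (text : String) : String :=
  String.ofList (pvBGo text.toList)

-- ===== PRECONDITION & SPEC =====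
def Spec_strip_lean_strings_py (text : String) (out : String) : Prop := out = strip_lean_strings_py_alt text
instance (text : String) (out : String) : Decidable (Spec_strip_lean_strings_py text out) := by unfold Spec_strip_lean_strings_py; infer_instance

-- ===== CLAIM (what is proved, stated in full; the proofs are below) =====
def Claim_equal_strip_lean_strings_py : Prop := ∀ (text : String), Dom_strip_lean_strings_py text → Spec_strip_lean_strings_py text (strip_lean_strings_py text)

-- ===== LEMMAS AND PROOFS =====

-- remaining unfolding equations of pvBConsume, and those of pvBGo (well-founded, so rw-based)
lemma pvBConsume_bs1 : pvBConsume ['\\'] = (['\\'], []) := by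
  rw [pvBConsume.eq_def]; simp
lemma pvBConsume_bs (d : Char) (cs : List Char) :
    pvBConsume ('\\' :: d :: cs) = ('\\' :: d :: (pvBConsume cs).1, (pvBConsume cs).2) := by
  rw [pvBConsume.eq_def]; simp
-- unfolding equations of pvBGo (well-founded recursion, so rw-based)
lemma pvBGo_nil : pvBGo [] = [] := by rw [pvBGo.eq_def]
lemma pvBGo_quote (cs : List Char) :
    pvBGo ('"' :: cs) = pvBlank ('"' :: (pvBConsume cs).1) ++ pvBGo (pvBConsume cs).2 := by
  rw [pvBGo.eq_def]; simp
lemma pvBGo_other {c : Char} (h : c ≠ '"') (cs : List Char) :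
    pvBGo (c :: cs) = c :: pvBGo cs := by
  rw [pvBGo.eq_def]; simp [h]

-- Joint invariant, by strong induction on the list length: outside a string A's automaton agrees
-- with B's outer loop, and inside a string (escape flag clear) A's automaton produces exactly the
-- blanked remainder of the literal followed by B's processing of the rest.
lemma pv_main : ∀ (n : Nat) (cs : List Char), cs.length ≤ n →
    (pvAGo cs false false = pvBGo cs ∧
     pvAGo cs true false = pvBlank (pvBConsume cs).1 ++ pvBGo (pvBConsume cs).2) := by
  intro n
  induction n with
  | zero =>
      intro cs h
      have : cs = [] := List.eq_nil_of_length_eq_zero (Nat.le_zero.mp h)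
      subst this
      simp [pvAGo, pvBGo_nil, pvBConsume, pvBlank]
  | succ n ih =>
      intro cs h
      match cs with
      | [] => simp [pvAGo, pvBGo_nil, pvBConsume, pvBlank]
      | c :: cs' =>
        have hlen : cs'.length ≤ n := by simpa using Nat.lt_succ_iff.mp (Nat.lt_of_lt_of_le (by simp) h)
        constructor
        · -- outside a string
          by_cases hc : c = '"'
          · subst hc
            have h2 := (ih cs' hlen).2
            simp [pvAGo, pvBGo_quote, pvBlank, h2]
          · simp [pvAGo, pvBGo_other hc, hc, (ih cs' hlen).1]
        · -- inside a string, escape flag clear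
          by_cases hn : c = '\n'
          · subst hn
            simp [pvAGo, pvBConsume_other (c := '\n') (by decide) (by decide) cs', pvBlank, (ih cs' hlen).2]
          · by_cases hq : c = '"'
            · subst hq
              simp [pvAGo, pvBConsume_quote, pvBlank, (ih cs' hlen).1]
            · by_cases hb : c = '\\'
              · subst hb
                match cs' with
                | [] => simp [pvAGo, pvBConsume_bs1, pvBlank, pvBGo_nil]
                | d :: cs'' =>
                  have hlen2 : cs''.length ≤ n := by
                    simp at hlen; omega
                  have h2 := (ih cs'' hlen2).2
                  by_cases hd : d = '\n'
                  · subst hd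
                    simp [pvAGo, pvBConsume_bs, pvBlank, h2]
                  · simp [pvAGo, pvBConsume_bs, pvBlank, hd, h2]
              · simp [pvAGo, pvBConsume_other hq hb, pvBlank, hn, hq, hb, (ih cs' hlen).2]

-- ===== VERDICT (by name: the statement is the Claim_ definition above) =====
theorem strip_lean_strings_py_spec : Claim_equal_strip_lean_strings_py := by
  intro text _
  unfold Spec_strip_lean_strings_py strip_lean_strings_py strip_lean_strings_py_alt
  exact congrArg String.ofList (pv_main text.toList.length text.toList le_rfl).1
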